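-- pv_equiv track=rewrite | github.com/encosoftware/ifps | ScheduleOptimisation/Sequence/PathOptimizer.py | __get_not_cowered_for_order
-- ===== SOURCE A (Python) =====
-- def __get_not_cowered_for_order(pts, ids, last_id):
--     rest = []
--     last = None
--     for value in pts:
--         if value[0] in ids:
--             rest.append(value)
--         if value[0] == last_id:
--             last = value[1]
--     return rest, last
-- ===== SOURCE B (Python) =====
-- def __get_not_cowered_for_order(pts, ids, last_id):
--     rest = [v for v in pts if v[0] in ids]
--     last = next((v[1] for v in reversed(pts) if v[0] == last_id), None)
--     return rest, last
-- ===== Notes on version B (the rewrite author's own statement) =====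
-- stated objective: alternative
-- what changed: Replaces the single fused forward loop (appending and overwriting last) by two independent passes: a filter comprehension for rest and a short-circuiting backward scan for the last occurrence of last_id.
import Mathlib
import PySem

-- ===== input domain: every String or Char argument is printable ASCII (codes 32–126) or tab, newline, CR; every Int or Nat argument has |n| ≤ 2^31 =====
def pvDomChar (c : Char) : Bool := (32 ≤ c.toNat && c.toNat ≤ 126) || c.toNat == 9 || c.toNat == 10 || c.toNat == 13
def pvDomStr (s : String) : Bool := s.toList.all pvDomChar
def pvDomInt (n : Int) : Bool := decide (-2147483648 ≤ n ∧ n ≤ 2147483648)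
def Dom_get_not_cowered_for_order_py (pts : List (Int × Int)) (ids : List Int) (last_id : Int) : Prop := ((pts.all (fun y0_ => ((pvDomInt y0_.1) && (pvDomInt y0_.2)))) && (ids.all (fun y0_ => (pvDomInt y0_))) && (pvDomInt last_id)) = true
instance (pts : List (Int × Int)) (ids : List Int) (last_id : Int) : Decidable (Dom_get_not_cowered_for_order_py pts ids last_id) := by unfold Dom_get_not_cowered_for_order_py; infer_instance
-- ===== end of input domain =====

-- B splits A's fused forward loop into a filter pass and a backward short-circuiting scan (objective: alternative decomposition)

-- ===== PORT A =====
-- one fused forward loop carrying (rest, last)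
def get_not_cowered_for_order_py (pts : List (Int × Int)) (ids : List Int) (last_id : Int) : (List (Int × Int)) × Option Int :=
  pts.foldl (fun (acc : (List (Int × Int)) × Option Int) value =>
    let rest := if ids.contains value.1 then acc.1 ++ [value] else acc.1
    let last := if value.1 == last_id then some value.2 else acc.2
    (rest, last)) ([], none)

-- ===== PORT B =====
-- filter comprehension, plus next(... reversed(pts) ...) = first match of the reversed list
def get_not_cowered_for_order_py_alt (pts : List (Int × Int)) (ids : List Int) (last_id : Int) : (List (Int × Int)) × Option Int :=
  (pts.filter (fun v => ids.contains v.1),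
   (pts.reverse.find? (fun v => v.1 == last_id)).map Prod.snd)

-- ===== PRECONDITION & SPEC =====
def Spec_get_not_cowered_for_order_py (pts : List (Int × Int)) (ids : List Int) (last_id : Int) (out : (List (Int × Int)) × Option Int) : Prop := out = get_not_cowered_for_order_py_alt pts ids last_id
instance (pts : List (Int × Int)) (ids : List Int) (last_id : Int) (out : (List (Int × Int)) × Option Int) : Decidable (Spec_get_not_cowered_for_order_py pts ids last_id out) := by unfold Spec_get_not_cowered_for_order_py; infer_instance

-- ===== CLAIM (what is proved, stated in full; the proofs are below) =====
def Claim_equal_get_not_cowered_for_order_py : Prop := ∀ (pts : List (Int × Int)) (ids : List Int) (last_id : Int), Dom_get_not_cowered_for_order_py pts ids last_id → Spec_get_not_cowered_for_order_py pts ids last_id (get_not_cowered_for_order_py pts ids last_id)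

-- ===== LEMMAS AND PROOFS =====

theorem gncfo_loop (ids : List Int) (last_id : Int) (pts : List (Int × Int))
    (acc : List (Int × Int)) (l : Option Int) :
    pts.foldl (fun (acc : (List (Int × Int)) × Option Int) value =>
      let rest := if ids.contains value.1 then acc.1 ++ [value] else acc.1
      let last := if value.1 == last_id then some value.2 else acc.2
      (rest, last)) (acc, l)
    = (acc ++ pts.filter (fun v => ids.contains v.1),
       Option.or ((pts.reverse.find? (fun v => v.1 == last_id)).map Prod.snd) l) := by
  induction pts generalizing acc l with
  | nil => simp
  | cons a t ih =>
    simp only [List.foldl_cons, ih, List.filter_cons, List.reverse_cons, List.find?_append]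
    simp only [Prod.mk.injEq]
    constructor
    · split <;> simp
    · have hfa : List.find? (fun v => v.1 == last_id) [a]
          = if a.1 = last_id then some a else none := by
        simp only [List.find?]
        by_cases hb : a.1 = last_id
        · have hbt : (a.1 == last_id) = true := by simp [hb]
          rw [hbt]; simp [hb]
        · have hbf : (a.1 == last_id) = false := by simp [hb]
          rw [hbf]; simp [hb]
      rw [hfa]
      cases h : t.reverse.find? (fun v => v.1 == last_id) <;> split <;> simp_all

-- ===== VERDICT (by name: the statement is the Claim_ definition above) =====
theorem get_not_cowered_for_order_py_spec : Claim_equal_get_not_cowered_for_order_py := by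
  intro pts ids last_id _
  unfold Spec_get_not_cowered_for_order_py get_not_cowered_for_order_py get_not_cowered_for_order_py_alt
  rw [gncfo_loop]
  simp
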